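-- pv_equiv track=rewrite | github.com/eliascipre/backend_AI_mx32 | Backend_IA_mx32/src/api/deepchat_endpoints.py | convert_markdown_table_to_html
-- ===== SOURCE A (Python) =====
-- def convert_markdown_table_to_html(text: str) -> str:
--     """Convierte tablas markdown a HTML"""
--     lines = text.split('\n')
--     html_lines = []
--     in_table = False
--
--     for line in lines:
--         if '|' in line and line.strip():
--             if not in_table:
--                 html_lines.append('<div class="table-responsive">')
--                 html_lines.append('<table class="table table-striped table-bordered">')
--                 in_table = True
--
--             # Limpiar la línea
--             clean_line = line.strip()
--             if clean_line.startswith('|') and clean_line.endswith('|'):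
--                 cells = [cell.strip() for cell in clean_line[1:-1].split('|')]
--
--                 if '---' in line or '===' in line:
--                     # Es una línea de separación, la saltamos
--                     continue
--                 else:
--                     # Es una fila de datos
--                     html_cells = ''.join([f'<td class="table-cell-content">{cell}</td>' for cell in cells])
--                     html_lines.append(f'<tr>{html_cells}</tr>')
--         else:
--             if in_table:
--                 html_lines.append('</table>')
--                 html_lines.append('</div>')
--                 in_table = False
--             html_lines.append(line)
--
--     if in_table:
--         html_lines.append('</table>')
--         html_lines.append('</div>')
--
--     return '\n'.join(html_lines)
-- ===== SOURCE B (Python) =====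
-- def convert_markdown_table_to_html(text: str) -> str:
--     """Convierte tablas markdown a HTML (segment-based two-pass rewrite)."""
--
--     def tableish(line):
--         return '|' in line and bool(line.strip())
--
--     def row_html(line):
--         s = line.strip()
--         if not (s.startswith('|') and s.endswith('|')):
--             return []
--         if '---' in line or '===' in line:
--             return []
--         cells = [c.strip() for c in s[1:-1].split('|')]
--         return ['<tr>' + ''.join('<td class="table-cell-content">' + c + '</td>' for c in cells) + '</tr>']
--
--     lines = text.split('\n')
--     out = []
--     i, n = 0, len(lines)
--     while i < n:
--         if tableish(lines[i]):
--             j = i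
--             while j < n and tableish(lines[j]):
--                 j += 1
--             out.append('<div class="table-responsive">')
--             out.append('<table class="table table-striped table-bordered">')
--             for k in range(i, j):
--                 out.extend(row_html(lines[k]))
--             out.append('</table>')
--             out.append('</div>')
--             i = j
--         else:
--             j = i
--             while j < n and not tableish(lines[j]):
--                 j += 1
--             out.extend(lines[i:j])
--             i = j
--     return '\n'.join(out)
-- ===== Notes on version B (the rewrite author's own statement) =====
-- stated objective: alternative
-- what changed: Replaces A's single line loop with an in_table flag by a two-pass segment decomposition: the lines are partitioned into maximal table-ish/plain runs and each run is rendered as a whole (open tags, rows, close tags per table run; plain runs copied verbatim).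
import Mathlib
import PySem

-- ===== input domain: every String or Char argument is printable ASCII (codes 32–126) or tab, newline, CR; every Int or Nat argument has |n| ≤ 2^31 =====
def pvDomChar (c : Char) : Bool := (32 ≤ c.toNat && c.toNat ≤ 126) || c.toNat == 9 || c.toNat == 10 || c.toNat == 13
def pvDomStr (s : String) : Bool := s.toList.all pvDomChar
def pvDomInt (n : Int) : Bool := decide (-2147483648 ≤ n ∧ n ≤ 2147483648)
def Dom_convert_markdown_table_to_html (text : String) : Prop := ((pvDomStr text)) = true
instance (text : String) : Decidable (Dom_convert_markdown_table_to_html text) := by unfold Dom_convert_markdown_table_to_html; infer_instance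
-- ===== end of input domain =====

-- B rewrites A's single stateful line loop as a two-pass segment decomposition (split into
-- maximal table-ish / plain runs, then render each run); same output, objective: alternative.

-- ===== PORT A =====
-- A's loop body (the for-line step over the state (html_lines, in_table)), transliterated.
def pvStepA (st : List String × Bool) (line : String) : List String × Bool :=
  let html_lines := st.1
  let in_table := st.2
  if PySem.Str.isIn "|" line && (PySem.Str.strip line != "") then
    -- open the table on the first table-ish line
    let html_lines := if !in_table then
        html_lines ++ ["<div class=\"table-responsive\">",
                       "<table class=\"table table-striped table-bordered\">"]
      else html_lines
    let clean_line := PySem.Str.strip line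
    if PySem.Str.startswith clean_line "|" && PySem.Str.endswith clean_line "|" then
      let cells := ((PySem.Str.split? (PySem.Str.slice clean_line (some 1) (some (-1))) "|").getD []).map PySem.Str.strip
      if PySem.Str.isIn "---" line || PySem.Str.isIn "===" line then
        (html_lines, true)  -- separator row: skip (continue)
      else
        let html_cells := PySem.Str.join "" (cells.map (fun cell => "<td class=\"table-cell-content\">" ++ cell ++ "</td>"))
        (html_lines ++ ["<tr>" ++ html_cells ++ "</tr>"], true)
    else
      (html_lines, true)
  else
    if in_table then (html_lines ++ ["</table>", "</div>", line], false)
    else (html_lines ++ [line], false)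

def convert_markdown_table_to_html (text : String) : String :=
  let lines := (PySem.Str.split? text "\n").getD []   -- sep "\n" ≠ "": split? is always some
  let r := lines.foldl pvStepA ([], false)
  let html_lines := if r.2 then r.1 ++ ["</table>", "</div>"] else r.1
  PySem.Str.join "\n" html_lines

-- ===== PORT B =====
def pvTableish (line : String) : Bool :=
  PySem.Str.isIn "|" line && (PySem.Str.strip line != "")

def pvRowHtml (line : String) : List String :=
  let s := PySem.Str.strip line
  if !(PySem.Str.startswith s "|" && PySem.Str.endswith s "|") then []
  else if PySem.Str.isIn "---" line || PySem.Str.isIn "===" line then []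
  else
    let cells := ((PySem.Str.split? (PySem.Str.slice s (some 1) (some (-1))) "|").getD []).map PySem.Str.strip
    ["<tr>" ++ PySem.Str.join "" (cells.map (fun c => "<td class=\"table-cell-content\">" ++ c ++ "</td>")) ++ "</tr>"]

-- second pass: render a maximal run (the while loops advancing i to j = walking the suffix)
def pvRender : List String → List String
  | [] => []
  | l :: ls =>
    if pvTableish l then
      ["<div class=\"table-responsive\">",
       "<table class=\"table table-striped table-bordered\">"]
        ++ (l :: ls.takeWhile pvTableish).flatMap pvRowHtml
        ++ ["</table>", "</div>"]
        ++ pvRender (ls.dropWhile pvTableish)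
    else
      l :: (ls.takeWhile (fun x => !pvTableish x)
        ++ pvRender (ls.dropWhile (fun x => !pvTableish x)))
  termination_by ls => ls.length
  decreasing_by
  · have := List.length_dropWhile_le pvTableish ls; simp; omega
  · have := List.length_dropWhile_le (fun x => !pvTableish x) ls; simp; omega

def convert_markdown_table_to_html_alt (text : String) : String :=
  let lines := (PySem.Str.split? text "\n").getD []
  PySem.Str.join "\n" (pvRender lines)

-- ===== PRECONDITION & SPEC =====
def Spec_convert_markdown_table_to_html (text : String) (out : String) : Prop := out = convert_markdown_table_to_html_alt text
instance (text : String) (out : String) : Decidable (Spec_convert_markdown_table_to_html text out) := by unfold Spec_convert_markdown_table_to_html; infer_instance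

-- ===== CLAIM (what is proved, stated in full; the proofs are below) =====
def Claim_equal_convert_markdown_table_to_html : Prop := ∀ (text : String), Dom_convert_markdown_table_to_html text → Spec_convert_markdown_table_to_html text (convert_markdown_table_to_html text)

-- ===== LEMMAS AND PROOFS =====

def pvOpen : List String :=
  ["<div class=\"table-responsive\">", "<table class=\"table table-striped table-bordered\">"]
def pvClose : List String := ["</table>", "</div>"]

-- A's remaining output from state in_table, including the final close: a recursive reading of the loop
def pvCont : List String → Bool → List String
  | [], inT => if inT then pvClose else []
  | l :: ls, inT =>
    if pvTableish l then
      (if inT then [] else pvOpen) ++ pvRowHtml l ++ pvCont ls true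
    else
      (if inT then pvClose else []) ++ l :: pvCont ls false

theorem pvStepA_table {l : String} (acc : List String) (inT : Bool) (h : pvTableish l = true) :
    pvStepA (acc, inT) l = (acc ++ (if inT then [] else pvOpen) ++ pvRowHtml l, true) := by
  simp only [pvTableish] at h
  simp only [pvStepA, pvRowHtml, pvOpen, h]
  cases inT <;> split_ifs <;> simp_all

theorem pvStepA_plain {l : String} (acc : List String) (inT : Bool) (h : pvTableish l = false) :
    pvStepA (acc, inT) l = (acc ++ (if inT then pvClose else []) ++ [l], false) := by
  simp only [pvTableish] at h
  simp only [pvStepA, pvClose, h]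
  cases inT <;> simp

theorem pvFoldA_eq_cont (ls : List String) : ∀ (acc : List String) (inT : Bool),
    (ls.foldl pvStepA (acc, inT)).1
      ++ (if (ls.foldl pvStepA (acc, inT)).2 then pvClose else [])
    = acc ++ pvCont ls inT := by
  induction ls with
  | nil => intro acc inT; cases inT <;> simp [pvCont]
  | cons l ls ih =>
    intro acc inT
    cases h : pvTableish l with
    | true =>
      simp only [List.foldl_cons, pvStepA_table acc inT h, pvCont, h, if_true]
      rw [ih]; simp
    | false =>
      simp only [List.foldl_cons, pvStepA_plain acc inT h, pvCont, h]
      rw [ih]; simp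

theorem pvRender_plain_run (ls : List String) :
    ls.takeWhile (fun x => !pvTableish x) ++ pvRender (ls.dropWhile (fun x => !pvTableish x))
      = pvRender ls := by
  cases ls with
  | nil => simp [pvRender]
  | cons m ms =>
    cases h : pvTableish m with
    | true => simp [h]
    | false =>
      rw [pvRender]
      simp [h]

theorem pvCont_eq_render (ls : List String) :
    pvCont ls false = pvRender ls ∧
    pvCont ls true = (ls.takeWhile pvTableish).flatMap pvRowHtml ++ pvClose
      ++ pvRender (ls.dropWhile pvTableish) := by
  induction ls with
  | nil => simp [pvCont, pvRender]
  | cons l ls ih =>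
    obtain ⟨ih1, ih2⟩ := ih
    cases h : pvTableish l with
    | true =>
      constructor
      · rw [pvCont, pvRender]
        simp [h, ih2, pvOpen, pvClose]
      · rw [pvCont]
        simp [h, ih2]
    | false =>
      constructor
      · rw [pvCont]
        simp only [h, if_false, Bool.false_eq_true, List.nil_append]
        rw [ih1, pvRender]
        simp only [h, Bool.false_eq_true, if_false]
        rw [← pvRender_plain_run ls]
      · rw [pvCont]
        simp only [h, List.takeWhile_cons, List.dropWhile_cons, Bool.false_eq_true,
          if_false, ite_true]
        rw [ih1, pvRender]
        simp only [h, Bool.false_eq_true, if_false]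
        rw [← pvRender_plain_run ls]
        simp

-- ===== VERDICT (by name: the statement is the Claim_ definition above) =====
theorem convert_markdown_table_to_html_spec : Claim_equal_convert_markdown_table_to_html := by
  intro text _
  unfold Spec_convert_markdown_table_to_html
  have h := pvFoldA_eq_cont ((PySem.Str.split? text "\n").getD []) [] false
  rw [(pvCont_eq_render _).1] at h
  simp only [List.nil_append] at h
  simp only [convert_markdown_table_to_html, convert_markdown_table_to_html_alt]
  rw [← h]
  cases hr : (List.foldl pvStepA ([], false) ((PySem.Str.split? text "\n").getD [])).2 <;>
    simp [pvClose]
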